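-- pv_equiv track=rewrite | github.com/pathong/CU_grader | grader65/09/9-34.py | pattern4
-- ===== SOURCE A (Python) =====
-- def pattern4(n):
--     li = []
--     b_skip = 0
--     start = 1
--     for i in range(n):
--         l = []
--         num0 = i
--         skip =i+2
--         curr = start
--         for j in range(n):
--             if j < num0:
--                 l.append(0)
--                 continue
--             l.append(curr)
--             curr += skip
--             skip += 1
--         li.append(l)
--         b_skip +=1
--         start += b_skip
--     return li
-- ===== SOURCE B (Python) =====
-- def pattern4(n):
--     def cell(i, j):
--         if j < i:
--             return 0
--         d = j - i
--         return 1 + i * (i + 1) // 2 + d * (i + 2) + d * (d - 1) // 2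
--     return [[cell(i, j) for j in range(n)] for i in range(n)]
-- ===== Notes on version B (the rewrite author's own statement) =====
-- stated objective: simpler
-- what changed: Each cell is computed directly by a closed-form arithmetic formula from its row/column indices (nested comprehension, no state), replacing A's running curr/skip/start/b_skip accumulators carried across cells and rows.
import Mathlib
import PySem

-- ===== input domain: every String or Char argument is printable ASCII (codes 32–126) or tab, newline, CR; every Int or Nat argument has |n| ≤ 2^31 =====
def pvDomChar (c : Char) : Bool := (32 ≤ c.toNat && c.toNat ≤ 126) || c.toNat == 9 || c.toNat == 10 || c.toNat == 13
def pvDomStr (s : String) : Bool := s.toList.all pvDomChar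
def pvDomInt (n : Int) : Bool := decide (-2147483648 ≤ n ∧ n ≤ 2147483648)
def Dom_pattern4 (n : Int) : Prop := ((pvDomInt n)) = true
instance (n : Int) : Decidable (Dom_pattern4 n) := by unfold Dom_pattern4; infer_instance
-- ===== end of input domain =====

-- B replaces A's running curr/skip/start accumulators by a closed-form formula per cell (simpler).

-- ===== PORT A =====
def pattern4 (n : Int) : List (List Int) :=
  let st := (PySem.List.pyRange 0 n 1).foldl
    (fun (st : List (List Int) × Int × Int) i =>
      let li := st.1
      let b_skip := st.2.1
      let start := st.2.2
      -- inner loop: state (l, curr, skip), num0 = i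
      let inner := (PySem.List.pyRange 0 n 1).foldl
        (fun (s : List Int × Int × Int) j =>
          if j < i then (s.1 ++ [0], s.2.1, s.2.2)
          else (s.1 ++ [s.2.1], s.2.1 + s.2.2, s.2.2 + 1))
        ([], start, i + 2)
      (li ++ [inner.1], b_skip + 1, start + (b_skip + 1)))
    ([], 0, 1)
  st.1

-- ===== PORT B =====
def pattern4Cell (i j : Int) : Int :=
  if j < i then 0
  else
    let d := j - i
    1 + PySem.Int.floordiv (i * (i + 1)) 2 + d * (i + 2) + PySem.Int.floordiv (d * (d - 1)) 2

def pattern4_alt (n : Int) : List (List Int) :=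
  (PySem.List.pyRange 0 n 1).map (fun i => (PySem.List.pyRange 0 n 1).map (fun j => pattern4Cell i j))

-- ===== PRECONDITION & SPEC =====
def Spec_pattern4 (n : Int) (out : List (List Int)) : Prop := out = pattern4_alt n
instance (n : Int) (out : List (List Int)) : Decidable (Spec_pattern4 n out) := by unfold Spec_pattern4; infer_instance

-- ===== CLAIM (what is proved, stated in full; the proofs are below) =====
def Claim_equal_pattern4 : Prop := ∀ (n : Int), Dom_pattern4 n → Spec_pattern4 n (pattern4 n)

-- ===== LEMMAS AND PROOFS =====

/-- `htri d = d*(d-1)//2`, the triangular-number term both programs produce. -/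
def htri (d : Int) : Int := PySem.Int.floordiv (d * (d - 1)) 2

lemma htri_eq (d k : Int) (h : d * (d - 1) = 2 * k) : htri d = k := by
  unfold htri
  rw [h, PySem.Int.floordiv_eq_ediv_of_pos (by norm_num)]
  exact Int.mul_ediv_cancel_left k (by norm_num)

lemma htri_exists (d : Int) : ∃ k, d * (d - 1) = 2 * k ∧ htri d = k := by
  obtain ⟨k, hk⟩ := Int.even_mul_succ_self (d - 1)
  have h : d * (d - 1) = 2 * k := by rw [mul_comm]; simpa [two_mul] using hk
  exact ⟨k, h, htri_eq d k h⟩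

lemma htri_succ (d : Int) : htri (d + 1) = htri d + d := by
  obtain ⟨k, hk, hv⟩ := htri_exists d
  have : (d + 1) * (d + 1 - 1) = 2 * (k + d) := by ring_nf; linarith [hk]
  rw [htri_eq (d + 1) (k + d) this, hv]

lemma htri_zero : htri 0 = 0 := htri_eq 0 0 (by ring)
lemma htri_one : htri 1 = 0 := htri_eq 1 0 (by ring)

/-- closed form of one row's cell, parametrized by the row's starting value -/
def gcell (i start j : Int) : Int :=
  if j < i then 0 else start + (j - i) * (i + 2) + htri (j - i)

/-- inner-loop invariant: after the first `m` iterations the state is closed-form. -/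
lemma inner_inv (i start : Int) (hi : 0 ≤ i) (m : Nat) :
    (PySem.List.pyRange 0 (m : Int) 1).foldl
      (fun (s : List Int × Int × Int) j =>
        if j < i then (s.1 ++ [0], s.2.1, s.2.2)
        else (s.1 ++ [s.2.1], s.2.1 + s.2.2, s.2.2 + 1))
      ([], start, i + 2)
    = ((PySem.List.pyRange 0 (m : Int) 1).map (gcell i start),
       start + max ((m : Int) - i) 0 * (i + 2) + htri (max ((m : Int) - i) 0),
       i + 2 + max ((m : Int) - i) 0) := by
  induction m with
  | zero =>
    simp [PySem.List.pyRange_one_eq_nil (by norm_num : (0:Int) ≤ 0), htri_zero, hi]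
  | succ m ih =>
    have hm : (0:Int) ≤ (m : Int) := by positivity
    have hsplit : PySem.List.pyRange 0 ((m : Int) + 1) 1
        = PySem.List.pyRange 0 (m : Int) 1 ++ [(m : Int)] :=
      PySem.List.pyRange_one_succ_right hm
    push_cast
    rw [hsplit, List.foldl_append, ih, List.map_append]
    by_cases hlt : (m : Int) < i
    · have h1 : max ((m : Int) - i) 0 = 0 := by omega
      have h2 : max ((m : Int) + 1 - i) 0 = 0 := by omega
      simp [List.foldl, hlt, gcell, h1, htri_zero]
    · have h1 : max ((m : Int) - i) 0 = (m : Int) - i := by omega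
      have h2 : max ((m : Int) + 1 - i) 0 = ((m : Int) - i) + 1 := by omega
      simp only [List.foldl, if_neg hlt, h1, h2]
      refine Prod.ext ?_ (Prod.ext ?_ ?_) <;> simp [gcell, if_neg hlt, htri_succ]
      · ring
      · ring

/-- the starting value of row `i` in A is `1 + htri (i+1)` -/
def startOf (i : Int) : Int := 1 + htri (i + 1)

/-- outer-loop invariant -/
lemma outer_inv (n : Int) (m : Nat) (hm : (m : Int) ≤ n) :
    (PySem.List.pyRange 0 (m : Int) 1).foldl
      (fun (st : List (List Int) × Int × Int) i =>
        (st.1 ++ [((PySem.List.pyRange 0 n 1).foldl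
            (fun (s : List Int × Int × Int) j =>
              if j < i then (s.1 ++ [0], s.2.1, s.2.2)
              else (s.1 ++ [s.2.1], s.2.1 + s.2.2, s.2.2 + 1))
            ([], st.2.2, i + 2)).1],
         st.2.1 + 1, st.2.2 + (st.2.1 + 1)))
      ([], 0, 1)
    = ((PySem.List.pyRange 0 (m : Int) 1).map
         (fun i => (PySem.List.pyRange 0 n 1).map (gcell i (startOf i))),
       (m : Int), startOf (m : Int)) := by
  induction m with
  | zero => simp [PySem.List.pyRange_one_eq_nil (by norm_num : (0:Int) ≤ 0), startOf, htri_one]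
  | succ m ih =>
    have hm' : (m : Int) ≤ n := by push_cast at hm ⊢; omega
    have hm0 : (0:Int) ≤ (m : Int) := by positivity
    have hsplit : PySem.List.pyRange 0 ((m : Int) + 1) 1
        = PySem.List.pyRange 0 (m : Int) 1 ++ [(m : Int)] :=
      PySem.List.pyRange_one_succ_right hm0
    push_cast
    rw [hsplit, List.foldl_append, ih hm', List.map_append]
    -- one outer step at i = m
    have hn0 : (0:Int) ≤ n := le_trans (by positivity) hm
    have hnn : n = ((n.toNat : Nat) : Int) := by omega
    have hinner := inner_inv (m : Int) (startOf (m : Int)) hm0 n.toNat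
    rw [← hnn] at hinner
    simp only [List.foldl, hinner]
    refine Prod.ext ?_ (Prod.ext (by simp) ?_)
    · simp
    · simp only [startOf, htri_succ]
      ring

lemma gcell_eq_cell (i j : Int) : gcell i (startOf i) j = pattern4Cell i j := by
  unfold gcell startOf pattern4Cell htri
  by_cases h : j < i
  · simp [h]
  · simp only [if_neg h]
    have h1 : (i + 1) * (i + 1 - 1) = i * (i + 1) := by ring
    rw [h1]

-- ===== VERDICT (by name: the statement is the Claim_ definition above) =====
theorem pattern4_spec : Claim_equal_pattern4 := by
  intro n _
  unfold Spec_pattern4 pattern4 pattern4_alt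
  by_cases hn : 0 ≤ n
  · have hnn : n = ((n.toNat : Nat) : Int) := by omega
    have h := outer_inv n n.toNat (by omega)
    rw [← hnn] at h
    simp only [h]
    exact List.map_congr_left (fun i _ =>
      List.map_congr_left (fun j _ => gcell_eq_cell i j))
  · rw [PySem.List.pyRange_one_eq_nil (by omega : n ≤ 0)]
    simp
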